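-- pv_equiv track=rewrite | github.com/Demon720AA/IT21-Year1 | Python/[Midterm 2022] Netflix.py | process1
-- ===== SOURCE A (Python) =====
-- def process1(watch_same_time, download_on, watch_on_laptop_tv, \
-- hd_available, ultra_hd):
--     '''check'''
--     premium_pack = 0
--     standard_pack = 0
--     basic_pack = 0
--     mobile_pack = 0
--     while watch_same_time > 0 or download_on > 0:
--         # Premium
--         if (watch_same_time >= 3 or download_on >= 3) and (watch_on_laptop_tv == "yes"):
--             premium_pack += 1
--             watch_same_time -= 4
--             download_on -= 4
--             continue
--         elif ultra_hd == "yes":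
--             premium_pack += 1
--             watch_same_time -= 4
--             download_on -= 4
--             continue
--         # Standard
--         elif (watch_same_time == 2 or download_on == 2) and watch_on_laptop_tv == "yes":
--             standard_pack += 1
--             watch_same_time -= 2
--             download_on -= 2
--             continue
--         elif hd_available == "yes":
--             standard_pack += 1
--             watch_same_time -= 2
--             download_on -= 2
--             continue
--         # Basic
--         elif watch_on_laptop_tv == "yes":
--             basic_pack += 1
--             watch_same_time -= 1
--             download_on -= 1
--             continue
--         # Mobile
--         elif watch_same_time >= 1 or download_on >= 1:
--             mobile_pack += 1
--             watch_same_time -= 1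
--             download_on -= 1
--             continue
--     return premium_pack, standard_pack, basic_pack, mobile_pack
-- ===== SOURCE B (Python) =====
-- def process1(watch_same_time, download_on, watch_on_laptop_tv, \
-- hd_available, ultra_hd):
--     '''check'''
--     M = max(watch_same_time, download_on)
--     if M <= 0:
--         return 0, 0, 0, 0
--     if ultra_hd == "yes":
--         return (M + 3) // 4, 0, 0, 0
--     if watch_on_laptop_tv == "yes":
--         k = 0 if M < 3 else (M + 1) // 4
--         r = M - 4 * k
--         if r == 2:
--             return k, 1, 0, 0
--         if r == 1:
--             if hd_available == "yes":
--                 return k, 1, 0, 0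
--             return k, 0, 1, 0
--         return k, 0, 0, 0
--     if hd_available == "yes":
--         return 0, (M + 1) // 2, 0, 0
--     return 0, 0, 0, M
-- ===== Notes on version B (the rewrite author's own statement) =====
-- stated objective: faster
-- what changed: Replaces A's one-tier-per-iteration while loop (which decrements both counters until exhausted) with O(1) closed-form arithmetic on max(watch_same_time, download_on) after a case analysis on the three flag strings (ceiling divisions by 4 and 2).
import Mathlib
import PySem

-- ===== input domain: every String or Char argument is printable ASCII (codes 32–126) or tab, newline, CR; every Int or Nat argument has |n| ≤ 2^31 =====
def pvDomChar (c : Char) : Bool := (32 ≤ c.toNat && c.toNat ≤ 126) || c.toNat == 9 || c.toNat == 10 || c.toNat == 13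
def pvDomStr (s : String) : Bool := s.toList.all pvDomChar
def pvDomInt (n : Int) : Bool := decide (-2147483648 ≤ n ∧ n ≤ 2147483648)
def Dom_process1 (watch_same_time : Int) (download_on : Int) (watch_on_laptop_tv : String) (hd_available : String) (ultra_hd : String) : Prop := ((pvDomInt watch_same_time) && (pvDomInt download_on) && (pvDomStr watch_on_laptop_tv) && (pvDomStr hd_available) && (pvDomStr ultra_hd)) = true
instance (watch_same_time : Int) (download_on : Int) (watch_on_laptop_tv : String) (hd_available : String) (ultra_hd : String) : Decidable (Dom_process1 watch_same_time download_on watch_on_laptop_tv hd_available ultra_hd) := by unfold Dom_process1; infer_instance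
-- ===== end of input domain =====

-- B replaces A's one-decrement-at-a-time while loop by O(1) closed-form arithmetic on
-- max(watch_same_time, download_on) after a case analysis on the three flag strings.

-- ===== PORT A =====
-- literal port of A's while loop; state = (w, d, premium, standard, basic, mobile).
-- fuel is only a totality guard: each taken branch lowers max w d by at least 1,
-- so fuel = (max w d).toNat at entry never runs out before the loop condition fails.
def process1Loop : Nat → Int → Int → String → String → String → Int → Int → Int → Int → Int × Int × Int × Int
  | 0, _, _, _, _, _, p, s, b, mo => (p, s, b, mo)
  | fuel + 1, w, d, lap, hd, uhd, p, s, b, mo =>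
    if w > 0 ∨ d > 0 then
      if (w ≥ 3 ∨ d ≥ 3) ∧ lap = "yes" then
        process1Loop fuel (w - 4) (d - 4) lap hd uhd (p + 1) s b mo
      else if uhd = "yes" then
        process1Loop fuel (w - 4) (d - 4) lap hd uhd (p + 1) s b mo
      else if (w = 2 ∨ d = 2) ∧ lap = "yes" then
        process1Loop fuel (w - 2) (d - 2) lap hd uhd p (s + 1) b mo
      else if hd = "yes" then
        process1Loop fuel (w - 2) (d - 2) lap hd uhd p (s + 1) b mo
      else if lap = "yes" then
        process1Loop fuel (w - 1) (d - 1) lap hd uhd p s (b + 1) mo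
      else if w ≥ 1 ∨ d ≥ 1 then
        process1Loop fuel (w - 1) (d - 1) lap hd uhd p s b (mo + 1)
      else
        (p, s, b, mo)  -- unreachable: w > 0 ∨ d > 0 implies w ≥ 1 ∨ d ≥ 1
    else
      (p, s, b, mo)

def process1 (watch_same_time : Int) (download_on : Int) (watch_on_laptop_tv : String) (hd_available : String) (ultra_hd : String) : Int × Int × Int × Int :=
  process1Loop (max watch_same_time download_on).toNat watch_same_time download_on
    watch_on_laptop_tv hd_available ultra_hd 0 0 0 0

-- ===== PORT B =====
def process1_alt (watch_same_time : Int) (download_on : Int) (watch_on_laptop_tv : String) (hd_available : String) (ultra_hd : String) : Int × Int × Int × Int :=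
  let M := max watch_same_time download_on
  if M ≤ 0 then (0, 0, 0, 0)
  else if ultra_hd = "yes" then (PySem.Int.floordiv (M + 3) 4, 0, 0, 0)
  else if watch_on_laptop_tv = "yes" then
    let k := if M < 3 then 0 else PySem.Int.floordiv (M + 1) 4
    let r := M - 4 * k
    if r = 2 then (k, 1, 0, 0)
    else if r = 1 then
      (if hd_available = "yes" then (k, 1, 0, 0) else (k, 0, 1, 0))
    else (k, 0, 0, 0)
  else if hd_available = "yes" then (0, PySem.Int.floordiv (M + 1) 2, 0, 0)
  else (0, 0, 0, M)

-- ===== PRECONDITION & SPEC =====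
def Spec_process1 (watch_same_time : Int) (download_on : Int) (watch_on_laptop_tv : String) (hd_available : String) (ultra_hd : String) (out : Int × Int × Int × Int) : Prop := out = process1_alt watch_same_time download_on watch_on_laptop_tv hd_available ultra_hd
instance (watch_same_time : Int) (download_on : Int) (watch_on_laptop_tv : String) (hd_available : String) (ultra_hd : String) (out : Int × Int × Int × Int) : Decidable (Spec_process1 watch_same_time download_on watch_on_laptop_tv hd_available ultra_hd out) := by unfold Spec_process1; infer_instance

-- ===== CLAIM (what is proved, stated in full; the proofs are below) =====
def Claim_equal_process1 : Prop := ∀ (watch_same_time : Int) (download_on : Int) (watch_on_laptop_tv : String) (hd_available : String) (ultra_hd : String), Dom_process1 watch_same_time download_on watch_on_laptop_tv hd_available ultra_hd → Spec_process1 watch_same_time download_on watch_on_laptop_tv hd_available ultra_hd (process1 watch_same_time download_on watch_on_laptop_tv hd_available ultra_hd)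

-- ===== LEMMAS AND PROOFS =====

-- the loop with accumulators adds the closed form componentwise to the accumulators
set_option maxHeartbeats 1000000 in
-- the loop with accumulators adds the closed form componentwise to the accumulators
theorem process1Loop_eq (n : Nat) :
    ∀ (w d : Int) (lap hd uhd : String) (p s b mo : Int),
      (max w d).toNat ≤ n →
      process1Loop n w d lap hd uhd p s b mo =
        ((p + (process1_alt w d lap hd uhd).1,
          s + (process1_alt w d lap hd uhd).2.1,
          b + (process1_alt w d lap hd uhd).2.2.1,
          mo + (process1_alt w d lap hd uhd).2.2.2) : Int × Int × Int × Int) := by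
  induction n with
  | zero =>
    intro w d lap hd uhd p s b mo hn
    have hM : max w d ≤ 0 := by
      rcases max_cases w d with ⟨hA, hB⟩ | ⟨hA, hB⟩ <;> omega
    rcases max_cases w d with ⟨hA, hB⟩ | ⟨hA, hB⟩ <;>
      simp only [process1_alt, process1Loop, hA] at hM ⊢ <;>
      split_ifs <;> first | omega | (simp only [Prod.mk.injEq, and_true, true_and]; omega)
  | succ n IH =>
    intro w d lap hd uhd p s b mo hn
    rw [process1Loop]
    by_cases hl : w > 0 ∨ d > 0
    · rw [if_pos hl]
      have hmax : ∀ k : Int, 0 < k → ((max (w - k) (d - k)).toNat ≤ n) := by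
        intro k hk
        rcases max_cases w d with ⟨h1, h2⟩ | ⟨h1, h2⟩ <;>
          rcases max_cases (w - k) (d - k) with ⟨h3, h4⟩ | ⟨h3, h4⟩ <;> omega
      split_ifs with h1 h2 h3 h4 h5 h6
      · -- premium via laptop: lap = "yes", max ≥ 3
        rw [IH _ _ _ _ _ _ _ _ _ (hmax 4 (by norm_num))]
        clear IH hmax hn
        obtain ⟨h1a, h1b⟩ := h1
        have hsub := Int.sub_max_sub_right w d 4
        have hM : 3 ≤ max w d := by
          rcases max_cases w d with ⟨hA, hB⟩ | ⟨hA, hB⟩ <;> omega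
        by_cases hu : uhd = "yes" <;>
          simp only [process1_alt,
            PySem.Int.floordiv_eq_ediv_of_pos (show (0:Int) < 4 by norm_num),
            PySem.Int.floordiv_eq_ediv_of_pos (show (0:Int) < 2 by norm_num),
            hsub, h1b, hu, reduceIte] <;>
          rcases max_cases w d with ⟨hA, hB⟩ | ⟨hA, hB⟩ <;>
          simp only [hA] at hM ⊢ <;> split_ifs <;> simp only [Prod.mk.injEq, and_true, true_and] <;> omega
      · -- premium via ultra_hd
        rw [IH _ _ _ _ _ _ _ _ _ (hmax 4 (by norm_num))]
        clear IH hmax hn h1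
        have hsub := Int.sub_max_sub_right w d 4
        have hM : 0 < max w d := by
          rcases max_cases w d with ⟨hA, hB⟩ | ⟨hA, hB⟩ <;> omega
        simp only [process1_alt,
          PySem.Int.floordiv_eq_ediv_of_pos (show (0:Int) < 4 by norm_num),
          hsub, h2, reduceIte]
        rcases max_cases w d with ⟨hA, hB⟩ | ⟨hA, hB⟩ <;>
          simp only [hA] at hM ⊢ <;> split_ifs <;> simp only [Prod.mk.injEq, and_true, true_and] <;> omega
      · -- standard via laptop: max = 2
        rw [IH _ _ _ _ _ _ _ _ _ (hmax 2 (by norm_num))]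
        clear IH hmax hn
        obtain ⟨h3a, h3b⟩ := h3
        have harith : ¬(w ≥ 3 ∨ d ≥ 3) := fun hc => h1 ⟨hc, h3b⟩
        have hsub := Int.sub_max_sub_right w d 2
        have hM : max w d = 2 := by
          rcases max_cases w d with ⟨hA, hB⟩ | ⟨hA, hB⟩ <;> omega
        simp only [process1_alt,
          PySem.Int.floordiv_eq_ediv_of_pos (show (0:Int) < 4 by norm_num),
          PySem.Int.floordiv_eq_ediv_of_pos (show (0:Int) < 2 by norm_num),
          hsub, hM, h3b, h2, reduceIte]
        norm_num
      · -- standard via hd_available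
        rw [IH _ _ _ _ _ _ _ _ _ (hmax 2 (by norm_num))]
        clear IH hmax hn
        have hsub := Int.sub_max_sub_right w d 2
        by_cases hlap : lap = "yes"
        · have harith1 : ¬(w ≥ 3 ∨ d ≥ 3) := fun hc => h1 ⟨hc, hlap⟩
          have harith2 : ¬(w = 2 ∨ d = 2) := fun hc => h3 ⟨hc, hlap⟩
          have hM : max w d = 1 := by
            rcases max_cases w d with ⟨hA, hB⟩ | ⟨hA, hB⟩ <;> omega
          simp only [process1_alt,
            PySem.Int.floordiv_eq_ediv_of_pos (show (0:Int) < 4 by norm_num),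
            PySem.Int.floordiv_eq_ediv_of_pos (show (0:Int) < 2 by norm_num),
            hsub, hM, hlap, h4, h2, reduceIte]
          norm_num
        · have hM : 0 < max w d := by
            rcases max_cases w d with ⟨hA, hB⟩ | ⟨hA, hB⟩ <;> omega
          simp only [process1_alt,
            PySem.Int.floordiv_eq_ediv_of_pos (show (0:Int) < 4 by norm_num),
            PySem.Int.floordiv_eq_ediv_of_pos (show (0:Int) < 2 by norm_num),
            hsub, hlap, h4, h2, reduceIte]
          rcases max_cases w d with ⟨hA, hB⟩ | ⟨hA, hB⟩ <;>
            simp only [hA] at hM ⊢ <;> split_ifs <;> simp only [Prod.mk.injEq, and_true, true_and] <;> omega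
      · -- basic: lap = "yes", max = 1, hd/ultra no
        rw [IH _ _ _ _ _ _ _ _ _ (hmax 1 (by norm_num))]
        clear IH hmax hn
        have harith1 : ¬(w ≥ 3 ∨ d ≥ 3) := fun hc => h1 ⟨hc, h5⟩
        have harith2 : ¬(w = 2 ∨ d = 2) := fun hc => h3 ⟨hc, h5⟩
        have hsub := Int.sub_max_sub_right w d 1
        have hM : max w d = 1 := by
          rcases max_cases w d with ⟨hA, hB⟩ | ⟨hA, hB⟩ <;> omega
        simp only [process1_alt,
          PySem.Int.floordiv_eq_ediv_of_pos (show (0:Int) < 4 by norm_num),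
          PySem.Int.floordiv_eq_ediv_of_pos (show (0:Int) < 2 by norm_num),
          hsub, hM, h5, h4, h2, reduceIte]
        norm_num
      · -- mobile: all flags no
        rw [IH _ _ _ _ _ _ _ _ _ (hmax 1 (by norm_num))]
        clear IH hmax hn h1 h3 h6
        have hsub := Int.sub_max_sub_right w d 1
        have hM : 0 < max w d := by
          rcases max_cases w d with ⟨hA, hB⟩ | ⟨hA, hB⟩ <;> omega
        simp only [process1_alt,
          PySem.Int.floordiv_eq_ediv_of_pos (show (0:Int) < 4 by norm_num),
          PySem.Int.floordiv_eq_ediv_of_pos (show (0:Int) < 2 by norm_num),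
          hsub, h5, h4, h2, reduceIte]
        rcases max_cases w d with ⟨hA, hB⟩ | ⟨hA, hB⟩ <;>
          simp only [hA] at hM ⊢ <;> split_ifs <;> simp only [Prod.mk.injEq, and_true, true_and] <;> omega
      · -- unreachable: w > 0 ∨ d > 0 contradicts ¬(w ≥ 1 ∨ d ≥ 1)
        omega
    · clear IH hn
      rw [if_neg hl]
      have hM : max w d ≤ 0 := by
        rcases max_cases w d with ⟨hA, hB⟩ | ⟨hA, hB⟩ <;> omega
      simp only [process1_alt, if_pos hM]
      norm_num

-- ===== VERDICT (by name: the statement is the Claim_ definition above) =====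
theorem process1_spec : Claim_equal_process1 := by
  intro w d lap hd uhd _
  show _ = _
  unfold process1
  rw [process1Loop_eq (max w d).toNat w d lap hd uhd 0 0 0 0 le_rfl]
  simp only [zero_add]
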